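-- pv_equiv track=rewrite | github.com/mjafferiqbal18/leetcodeDaily | longest_balanced_substring_i.py | checkAllSame
-- ===== SOURCE A (Python) =====
-- def checkAllSame(window):
--     ref = -1
--     for val in window:
--         if val>0 and ref==-1: #first non zero value encountered
--             ref = val
--
--         if val>0 and ref!=val:
--             return False
--     return True
-- ===== SOURCE B (Python) =====
-- def checkAllSame(window):
--     return len({v for v in window if v > 0}) <= 1
-- ===== Notes on version B (the rewrite author's own statement) =====
-- stated objective: simpler
-- what changed: Replaces the ref-scalar loop with compare-and-early-return by a one-line cardinality test on the set of distinct positive values built in a single comprehension.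
import Mathlib
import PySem

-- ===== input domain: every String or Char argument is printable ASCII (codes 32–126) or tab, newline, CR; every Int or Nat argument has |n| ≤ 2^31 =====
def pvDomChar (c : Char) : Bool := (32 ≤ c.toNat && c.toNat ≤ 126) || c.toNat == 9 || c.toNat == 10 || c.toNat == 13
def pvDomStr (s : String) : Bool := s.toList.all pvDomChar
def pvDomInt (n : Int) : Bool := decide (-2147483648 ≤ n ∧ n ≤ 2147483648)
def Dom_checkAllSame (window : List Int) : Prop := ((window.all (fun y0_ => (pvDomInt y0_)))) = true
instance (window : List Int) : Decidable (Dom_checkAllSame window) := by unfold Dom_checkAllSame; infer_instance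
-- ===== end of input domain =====

-- B replaces A's ref-scalar loop with early return by a cardinality test on the set of distinct positives (objective: simpler).


-- ===== PORT A =====
-- the for-loop over `window` carrying `ref`, with the early `return False`
def checkAllSameLoop (ref : Int) : List Int → Bool
  | [] => true
  | val :: rest =>
    let ref' := if val > 0 && ref == -1 then val else ref
    if val > 0 && ref' != val then false else checkAllSameLoop ref' rest

def checkAllSame (window : List Int) : Bool := checkAllSameLoop (-1) window

-- ===== PORT B =====
def checkAllSame_alt (window : List Int) : Bool :=
  decide ((PySem.Set.ofList (window.filter (fun v => decide (v > 0)))).length ≤ 1)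

-- ===== PRECONDITION & SPEC =====
def Spec_checkAllSame (window : List Int) (out : Bool) : Prop := out = checkAllSame_alt window
instance (window : List Int) (out : Bool) : Decidable (Spec_checkAllSame window out) := by unfold Spec_checkAllSame; infer_instance

-- ===== CLAIM (what is proved, stated in full; the proofs are below) =====
def Claim_equal_checkAllSame : Prop := ∀ (window : List Int), Dom_checkAllSame window → Spec_checkAllSame window (checkAllSame window)

-- ===== LEMMAS AND PROOFS =====

-- length never shrinks when folding Set.add
theorem pv_foldl_add_len_le (l : List Int) (s : PySem.Set Int) :
    s.length ≤ (l.foldl PySem.Set.add s).length := by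
  induction l generalizing s with
  | nil => simp
  | cons v rest ih =>
    refine le_trans ?_ (ih (PySem.Set.add s v))
    simp [PySem.Set.add]
    split <;> simp

-- B's cardinality test on a window whose first positive is p
theorem pv_card_le_one (rest : List Int) (p : Int) :
    decide ((rest.foldl PySem.Set.add [p]).length ≤ 1) = rest.all (fun v => v == p) := by
  induction rest with
  | nil => simp
  | cons v rest ih =>
    by_cases hv : v = p
    · subst hv
      simp only [List.foldl_cons, List.all_cons, beq_self_eq_true, Bool.true_and]
      have h : PySem.Set.add [v] v = [v] := by simp [PySem.Set.add]
      simp only [h]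
      exact ih
    · have hadd : PySem.Set.add [p] v = [p, v] := by
        simp [PySem.Set.add, PySem.Set.contains, hv]
      have hlen : 2 ≤ ((v :: rest).foldl PySem.Set.add [p]).length := by
        simpa [hadd] using pv_foldl_add_len_le rest [p, v]
      simp only [List.all_cons]
      rw [show (v == p) = false by simp [hv]]
      simp only [Bool.false_and, decide_eq_false_iff_not]
      omega

-- A's loop once a positive ref is fixed: every later positive must equal ref
theorem pv_loop_fixed (rest : List Int) (p : Int) (hp : 0 < p) :
    checkAllSameLoop p rest = rest.all (fun v => !(decide (v > 0)) || v == p) := by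
  induction rest with
  | nil => rfl
  | cons v rest ih =>
    have hne : (p == -1) = false := by simp; omega
    simp only [checkAllSameLoop, hne, Bool.and_false, List.all_cons]
    by_cases hv : 0 < v
    · by_cases hvp : v = p
      · subst hvp; simp [hv, ih]
      · have : (p != v) = true := by simp [Ne.symm hvp]
        simp [hv, this, hvp]
    · have : (decide (v > 0)) = false := by simpa using hv
      simp [this, ih]

-- all over a filter vs all with a guard
theorem pv_all_filter (rest : List Int) (p : Int) :
    (rest.filter (fun v => decide (v > 0))).all (fun v => v == p)
      = rest.all (fun v => !(decide (v > 0)) || v == p) := by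
  induction rest with
  | nil => rfl
  | cons v rest ih =>
    by_cases hv : 0 < v <;> simp [hv, ih]

-- main induction: until the first positive, both scan past non-positives
theorem pv_main (window : List Int) : checkAllSame window = checkAllSame_alt window := by
  unfold checkAllSame checkAllSame_alt
  induction window with
  | nil => rfl
  | cons v rest ih =>
    by_cases hv : 0 < v
    · have h1 : checkAllSameLoop (-1) (v :: rest) = checkAllSameLoop v rest := by
        simp [checkAllSameLoop, hv]
      have h2 : (v :: rest).filter (fun v => decide (v > 0))
          = v :: rest.filter (fun v => decide (v > 0)) := by
        simp [hv]
      rw [h1, h2, pv_loop_fixed rest v hv, ← pv_all_filter rest v]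
      exact (pv_card_le_one (rest.filter (fun v => decide (v > 0))) v).symm
    · have hvf : (decide (v > 0)) = false := by simpa using hv
      simp only [checkAllSameLoop, hvf, Bool.false_and, List.filter_cons]
      exact ih

-- ===== VERDICT (by name: the statement is the Claim_ definition above) =====
theorem checkAllSame_spec : Claim_equal_checkAllSame := by
  intro window _
  unfold Spec_checkAllSame
  exact pv_main window
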